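-- pv_equiv track=rewrite | github.com/Mahdiizadi1998/RAG_geothermal | geothermal-rag/test_multi_well_detection.py | find_wells_in_caption
-- ===== SOURCE A (Python) =====
-- def find_wells_in_caption(page_text, table_ref, document_wells):
--     """Extract 1 line before + same line + 1 line after (stop at empty lines)"""
--     if not table_ref or not page_text:
--         return []
--
--     ref_pos = page_text.find(table_ref)
--     if ref_pos == -1:
--         return []
--
--     # Find current line
--     line_start = page_text.rfind('\n', 0, ref_pos)
--     line_start = 0 if line_start == -1 else line_start + 1
--
--     line_end = page_text.find('\n', ref_pos)
--     line_end = len(page_text) if line_end == -1 else line_end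
--
--     current_line = page_text[line_start:line_end]
--
--     # Extract 1 line BEFORE (stop at empty line)
--     prev_line = ""
--     if line_start > 0:
--         prev_line_start = page_text.rfind('\n', 0, line_start - 1)
--         prev_line_start = 0 if prev_line_start == -1 else prev_line_start + 1
--         prev_line = page_text[prev_line_start:line_start - 1].strip()
--
--     # Extract 1 line AFTER (stop at empty line)
--     next_line = ""
--     if line_end < len(page_text):
--         next_line_end = page_text.find('\n', line_end + 1)
--         next_line_end = len(page_text) if next_line_end == -1 else next_line_end
--         next_line = page_text[line_end + 1:next_line_end].strip()
--
--     # Combine (filter out empty)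
--     caption_text = ' '.join(filter(None, [prev_line, current_line, next_line]))
--
--     return [well for well in document_wells if well in caption_text]
-- ===== SOURCE B (Python) =====
-- def find_wells_in_caption(page_text, table_ref, document_wells):
--     """Line-list version: split the page into lines, locate the line index of the
--     reference by counting newlines before it, and read neighbours by index."""
--     if not table_ref or not page_text:
--         return []
--     ref_pos = page_text.find(table_ref)
--     if ref_pos == -1:
--         return []
--     lines = page_text.split('\n')
--     j = page_text.count('\n', 0, ref_pos)
--     parts = []
--     if j > 0:
--         prev = lines[j - 1].strip()
--         if prev:
--             parts.append(prev)
--     if lines[j]: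
--         parts.append(lines[j])
--     if j + 1 < len(lines):
--         nxt = lines[j + 1].strip()
--         if nxt:
--             parts.append(nxt)
--     caption = ' '.join(parts)
--     return [well for well in document_wells if well in caption]
-- ===== Notes on version B (the rewrite author's own statement) =====
-- stated objective: alternative
-- what changed: B represents the page as an explicit list of lines (page_text.split('\n')), locates the caption line by counting newlines before the match position, and reads the previous/current/next lines by list index, instead of A's bounded find/rfind scans and index-arithmetic slicing over the raw string.
import Mathlib
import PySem

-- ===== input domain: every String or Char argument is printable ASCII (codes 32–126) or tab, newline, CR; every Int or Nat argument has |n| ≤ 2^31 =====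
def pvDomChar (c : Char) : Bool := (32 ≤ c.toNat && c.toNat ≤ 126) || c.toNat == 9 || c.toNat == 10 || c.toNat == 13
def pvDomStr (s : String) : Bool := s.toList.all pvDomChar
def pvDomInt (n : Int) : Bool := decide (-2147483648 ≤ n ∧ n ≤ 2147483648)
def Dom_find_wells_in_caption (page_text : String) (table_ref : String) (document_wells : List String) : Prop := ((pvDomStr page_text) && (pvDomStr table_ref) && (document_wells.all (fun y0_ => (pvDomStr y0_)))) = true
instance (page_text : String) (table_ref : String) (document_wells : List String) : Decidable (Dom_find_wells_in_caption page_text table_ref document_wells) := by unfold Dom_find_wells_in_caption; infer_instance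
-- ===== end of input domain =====

-- B represents the page as an explicit line list (split('\n')), locates the caption line by
-- counting newlines before the match and indexes its neighbours, instead of A's find/rfind
-- index arithmetic over the raw string: a different data representation, same cost.

-- ===== PORT A =====
def find_wells_in_caption (page_text : String) (table_ref : String) (document_wells : List String) : List String :=
  if table_ref == "" || page_text == "" then []
  else
    let ref_pos := PySem.Str.find page_text table_ref
    if ref_pos = -1 then []
    else
      let ls0 := PySem.Str.rfindFrom page_text "\n" 0 (some ref_pos)
      let line_start := if ls0 = -1 then 0 else ls0 + 1
      let le0 := PySem.Str.findFrom page_text "\n" ref_pos none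
      let line_end := if le0 = -1 then PySem.Str.len page_text else le0
      let current_line := PySem.Str.slice page_text (some line_start) (some line_end)
      let prev_line :=
        if 0 < line_start then
          let pls0 := PySem.Str.rfindFrom page_text "\n" 0 (some (line_start - 1))
          let prev_line_start := if pls0 = -1 then 0 else pls0 + 1
          PySem.Str.strip (PySem.Str.slice page_text (some prev_line_start) (some (line_start - 1)))
        else ""
      let next_line :=
        if line_end < PySem.Str.len page_text then
          let nle0 := PySem.Str.findFrom page_text "\n" (line_end + 1) none
          let next_line_end := if nle0 = -1 then PySem.Str.len page_text else nle0
          PySem.Str.strip (PySem.Str.slice page_text (some (line_end + 1)) (some next_line_end))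
        else ""
      let caption_text := PySem.Str.join " " (([prev_line, current_line, next_line]).filter (fun x => !(x == "")))
      document_wells.filter (fun well => PySem.Str.isIn well caption_text)

-- ===== PORT B =====
def find_wells_in_caption_alt (page_text : String) (table_ref : String) (document_wells : List String) : List String :=
  if table_ref == "" || page_text == "" then []
  else
    let ref_pos := PySem.Str.find page_text table_ref
    if ref_pos = -1 then []
    else
      -- page_text.split('\n'): sep "\n" ≠ "", so split? is `some`; the getD default is never used
      let lines := (PySem.Str.split? page_text "\n").getD []
      -- page_text.count('\n', 0, ref_pos): counted on the slice page_text[0:ref_pos] (exact)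
      let j := PySem.Str.count (PySem.Str.slice page_text (some 0) (some ref_pos)) "\n"
      let parts : List String := []
      let parts :=
        if 0 < j then
          -- lines[j-1]: index in range (j > 0), so the getD default is never used
          let prev := PySem.Str.strip (lines.getD (j - 1) "")
          if !(prev == "") then parts ++ [prev] else parts
        else parts
      -- lines[j]: index in range (j counts '\n' before a position inside the text)
      let cur := lines.getD j ""
      let parts := if !(cur == "") then parts ++ [cur] else parts
      let parts :=
        if j + 1 < lines.length then
          let nxt := PySem.Str.strip (lines.getD (j + 1) "")
          if !(nxt == "") then parts ++ [nxt] else parts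
        else parts
      let caption := PySem.Str.join " " parts
      document_wells.filter (fun well => PySem.Str.isIn well caption)

-- ===== PRECONDITION & SPEC =====
def Spec_find_wells_in_caption (page_text : String) (table_ref : String) (document_wells : List String) (out : List String) : Prop := out = find_wells_in_caption_alt page_text table_ref document_wells
instance (page_text : String) (table_ref : String) (document_wells : List String) (out : List String) : Decidable (Spec_find_wells_in_caption page_text table_ref document_wells out) := by unfold Spec_find_wells_in_caption; infer_instance

-- ===== CLAIM (what is proved, stated in full; the proofs are below) =====
def Claim_equal_find_wells_in_caption : Prop := ∀ (page_text : String) (table_ref : String) (document_wells : List String), Dom_find_wells_in_caption page_text table_ref document_wells → Spec_find_wells_in_caption page_text table_ref document_wells (find_wells_in_caption page_text table_ref document_wells)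

-- ===== LEMMAS AND PROOFS =====

-- keep-predicate: characters that are not the line separator
def pvKeep (c : Char) : Bool := c != '\n'

-- structural model of str.split('\n')
def pvLines : List Char → List (List Char)
  | [] => [[]]
  | c :: t => if c = '\n' then [] :: pvLines t else (pvLines t).modifyHead (c :: ·)

-- the line containing position i: the '\n'-free run left of i plus the one right of i
def pvCur (l : List Char) (i : Nat) : List Char :=
  ((l.take i).reverse.takeWhile pvKeep).reverse ++ (l.drop i).takeWhile pvKeep

-- common canonical form of both programs' result (P = match position of table_ref)
def pvCanon (pt : String) (P : Nat) (ws : List String) : List String :=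
  let s := pt.toList
  let w1 := ((s.take P).reverse.takeWhile pvKeep).length
  let w2 := ((s.drop P).takeWhile pvKeep).length
  let ls := P - w1
  let le := P + w2
  let prev := if 0 < ls then PySem.Str.strip (String.ofList (pvCur s (ls - 1))) else ""
  let next := if le < s.length then PySem.Str.strip (String.ofList (pvCur s (le + 1))) else ""
  let caption := PySem.Str.join " " (([prev, String.ofList (pvCur s P), next]).filter (fun x => !(x == "")))
  ws.filter (fun w => PySem.Str.isIn w caption)

theorem pv_keep_false_iff (c : Char) : pvKeep c = false ↔ c = '\n' := by
  simp [pvKeep]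

theorem pv_not_mem_takeWhile (x : List Char) : '\n' ∉ x.takeWhile pvKeep := by
  intro h
  have := List.mem_takeWhile_imp h
  simp [pvKeep] at this

theorem pv_prefix_cons_true (t : List Char) : (['\n'] : List Char).isPrefixOf ('\n' :: t) = true := by
  simp [List.isPrefixOf]

theorem pv_prefix_cons_false {c : Char} (t : List Char) (hc : c ≠ '\n') :
    (['\n'] : List Char).isPrefixOf (c :: t) = false := by
  simp [List.isPrefixOf]
  exact fun hh => hc hh.symm

theorem pv_prefix_false {x : List Char} (h : '\n' ∉ x) : (['\n'] : List Char).isPrefixOf x = false := by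
  cases x with
  | nil => rfl
  | cons c t =>
    exact pv_prefix_cons_false t (fun hc => h (by simp [hc]))

theorem pv_rfindFrom_zero_some (s sub : List Char) (P : Nat) (hP : P ≤ s.length) :
    PySem.Chars.rfindFrom s sub 0 (some (P : Int)) = PySem.Chars.rfind (s.take P) sub := by
  have h1 : ¬ ((s.length : Int) < (P : Int)) := by exact_mod_cast Nat.not_lt.mpr hP
  have h2 : ¬ ((P : Int) < 0) := by exact not_lt.mpr (Int.natCast_nonneg P)
  simp only [PySem.Chars.rfindFrom, h1, if_false, h2, lt_self_iff_false, Int.toNat_natCast,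
    List.drop_zero, Int.toNat_zero]
  by_cases h : PySem.Chars.rfind (s.take P) sub = -1 <;> simp [h]

-- find / rfind / count / splitOn characterised for the single-character pattern ['\n']

theorem pv_findgo (l : List Char) : ∀ k : Nat,
    PySem.Chars.find.go ['\n'] l k =
      if '\n' ∈ l then (((k + (l.takeWhile pvKeep).length : Nat)) : Int) else -1 := by
  induction l with
  | nil => intro k; simp [PySem.Chars.find.go]
  | cons c t ih =>
    intro k
    by_cases hc : c = '\n'
    · subst hc
      simp [PySem.Chars.find.go, pv_prefix_cons_true, pvKeep]
    · rw [show PySem.Chars.find.go ['\n'] (c :: t) k = PySem.Chars.find.go ['\n'] t (k + 1) from by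
        simp [PySem.Chars.find.go, pv_prefix_cons_false t hc]]
      rw [ih (k + 1)]
      by_cases hm : '\n' ∈ t
      · have hm' : '\n' ∈ c :: t := List.mem_cons_of_mem _ hm
        simp only [hm, hm', if_true, List.takeWhile_cons, show pvKeep c = true from by simp [pvKeep, hc]]
        push_cast
        simp [List.length_cons]
        omega
      · have hm' : '\n' ∉ c :: t := by
          intro hx
          rcases List.mem_cons.mp hx with hh | hh
          · exact hc hh.symm
          · exact hm hh
        simp [hm, hm']

theorem pv_find_nl (l : List Char) :
    PySem.Chars.find l ['\n'] = if '\n' ∈ l then (((l.takeWhile pvKeep).length : Nat) : Int) else -1 := by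
  simpa using pv_findgo l 0

theorem pv_rfindgo_notmem (l : List Char) (h : '\n' ∉ l) (m : Nat) : PySem.Chars.rfind.go l ['\n'] m = -1 := by
  induction m with
  | zero => simp [PySem.Chars.rfind.go, pv_prefix_false h]
  | succ m ih =>
    have h2 : '\n' ∉ l.drop (m + 1) := fun hx => h (List.mem_of_mem_drop hx)
    simp [PySem.Chars.rfind.go, pv_prefix_false h2, ih]

theorem pv_rfindgo_mem (l u v : List Char) (hl : l = u ++ '\n' :: v)
    (hv : '\n' ∉ v) : ∀ d : Nat, PySem.Chars.rfind.go l ['\n'] (u.length + d) = (u.length : Int) := by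
  have hdrop0 : l.drop u.length = '\n' :: v := by rw [hl, List.drop_left]
  intro d
  induction d with
  | zero =>
    have hpf : (['\n'] : List Char).isPrefixOf (l.drop u.length) = true := by
      rw [hdrop0]; exact pv_prefix_cons_true v
    cases hu : u.length with
    | zero =>
      rw [hu] at hpf; simp only [List.drop_zero] at hpf
      simp [PySem.Chars.rfind.go, hpf, hu]
    | succ n =>
      rw [hu] at hpf
      simp [PySem.Chars.rfind.go, hpf, hu]
  | succ d ih =>
    have h1 : l.drop (u.length + (d + 1)) = v.drop d := by
      rw [← List.drop_drop, hdrop0]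
      simp
    have h2 : '\n' ∉ l.drop (u.length + (d + 1)) := by
      rw [h1]; exact fun hx => hv (List.mem_of_mem_drop hx)
    rw [Nat.add_succ]
    rw [show PySem.Chars.rfind.go l ['\n'] ((u.length + d) + 1) = PySem.Chars.rfind.go l ['\n'] (u.length + d) from by
      simp [PySem.Chars.rfind.go, pv_prefix_false (show '\n' ∉ l.drop ((u.length + d) + 1) from by
        rw [show (u.length + d) + 1 = u.length + (d + 1) by omega]; exact h2)]]
    exact ih

theorem pv_decB (l : List Char) (h : '\n' ∈ l) :
    ∃ u : List Char, l = u ++ '\n' :: (l.reverse.takeWhile pvKeep).reverse ∧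
      u.length = l.length - (l.reverse.takeWhile pvKeep).length - 1 := by
  have hmem : '\n' ∈ l.reverse := by simpa using h
  have hne : l.reverse.dropWhile pvKeep ≠ [] := by
    intro h0
    have := List.dropWhile_eq_nil_iff.mp h0 '\n' hmem
    simp [pvKeep] at this
  obtain ⟨a, r, hdw⟩ := List.exists_cons_of_ne_nil hne
  have ha : a = '\n' := by
    have := List.head_dropWhile_not pvKeep hne
    simp only [hdw, List.head_cons] at this
    exact (pv_keep_false_iff a).mp this
  subst ha
  have hsplit0 : l.reverse = l.reverse.takeWhile pvKeep ++ '\n' :: r := by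
    conv_lhs => rw [← List.takeWhile_append_dropWhile (p := pvKeep) (l := l.reverse)]
    rw [hdw]
  have hsplit : l = r.reverse ++ '\n' :: (l.reverse.takeWhile pvKeep).reverse := by
    have h1 := congrArg List.reverse hsplit0
    simpa using h1
  refine ⟨r.reverse, hsplit, ?_⟩
  have h0 := congrArg List.length (List.takeWhile_append_dropWhile (p := pvKeep) (l := l.reverse))
  rw [hdw] at h0
  simp at h0 ⊢
  omega

theorem pv_rfind_nl (l : List Char) :
    PySem.Chars.rfind l ['\n'] =
      if '\n' ∈ l then (((l.length - 1 - (l.reverse.takeWhile pvKeep).length : Nat)) : Int) else -1 := by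
  by_cases hm : '\n' ∈ l
  · obtain ⟨u, hl, hulen⟩ := pv_decB l hm
    have hv : '\n' ∉ (l.reverse.takeWhile pvKeep).reverse := by
      simpa using pv_not_mem_takeWhile l.reverse
    have hlen : l.length = u.length + (((l.reverse.takeWhile pvKeep).reverse).length + 1) := by
      have h1 := congrArg List.length hl
      simp at h1 ⊢
      omega
    unfold PySem.Chars.rfind
    rw [if_pos hm]
    have hgo := pv_rfindgo_mem l u _ hl hv (((l.reverse.takeWhile pvKeep).reverse).length + 1)
    rw [← hlen] at hgo
    rw [hgo, hulen]
    congr 1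
    omega
  · simp [PySem.Chars.rfind, pv_rfindgo_notmem l hm, hm]

theorem pv_countgo : ∀ (fuel : Nat) (l : List Char) (acc : Nat), l.length ≤ fuel →
    PySem.Chars.count.go ['\n'] fuel l acc = acc + l.count '\n' := by
  intro fuel
  induction fuel with
  | zero =>
    intro l acc h
    have : l = [] := List.eq_nil_of_length_eq_zero (Nat.le_zero.mp h)
    subst this
    simp [PySem.Chars.count.go]
  | succ fuel ih =>
    intro l acc h
    cases l with
    | nil => simp [PySem.Chars.count.go]
    | cons c t =>
      by_cases hc : c = '\n'
      · subst hc
        rw [show PySem.Chars.count.go ['\n'] (fuel + 1) ('\n' :: t) acc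
            = PySem.Chars.count.go ['\n'] fuel t (acc + 1) from by
          simp [PySem.Chars.count.go, pv_prefix_cons_true]]
        rw [ih t (acc + 1) (by simp at h; omega)]
        have hcnt : List.count '\n' ('\n' :: t) = List.count '\n' t + 1 := by simp
        rw [hcnt]
        omega
      · rw [show PySem.Chars.count.go ['\n'] (fuel + 1) (c :: t) acc
            = PySem.Chars.count.go ['\n'] fuel t acc from by
          simp [PySem.Chars.count.go, pv_prefix_cons_false t hc]]
        rw [ih t acc (by simp at h; omega)]
        rw [List.count_cons, if_neg (by simp [hc]), Nat.add_zero]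

theorem pv_count_nl (l : List Char) : PySem.Chars.count l ['\n'] = l.count '\n' := by
  have h0 : (['\n'] : List Char).isEmpty = false := rfl
  simp [PySem.Chars.count, h0, pv_countgo l.length l 0 le_rfl]

theorem pv_length_pvLines (l : List Char) : (pvLines l).length = l.count '\n' + 1 := by
  induction l with
  | nil => simp [pvLines]
  | cons c t ih =>
    by_cases hc : c = '\n'
    · subst hc; simp [pvLines, List.count_cons, ih]
    · have hcnt : List.count '\n' (c :: t) = List.count '\n' t := by
        rw [List.count_cons, if_neg (by simp [hc]), Nat.add_zero]
      simp [pvLines, hc, hcnt, ih]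

theorem pv_pvLines_ne_nil (l : List Char) : pvLines l ≠ [] := by
  intro h
  have := pv_length_pvLines l
  rw [h] at this
  simp at this

theorem pv_splitgo : ∀ (fuel : Nat) (l cur : List Char) (acc : List (List Char)), l.length ≤ fuel →
    PySem.Chars.splitOn.go ['\n'] fuel l cur acc = acc.reverse ++ (pvLines l).modifyHead (cur.reverse ++ ·) := by
  intro fuel
  induction fuel with
  | zero =>
    intro l cur acc h
    have : l = [] := List.eq_nil_of_length_eq_zero (Nat.le_zero.mp h)
    subst this
    simp [PySem.Chars.splitOn.go, pvLines]
  | succ fuel ih =>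
    intro l cur acc h
    cases l with
    | nil => simp [PySem.Chars.splitOn.go, pvLines]
    | cons c t =>
      obtain ⟨h0, r, hL⟩ := List.exists_cons_of_ne_nil (pv_pvLines_ne_nil t)
      by_cases hc : c = '\n'
      · subst hc
        rw [show PySem.Chars.splitOn.go ['\n'] (fuel + 1) ('\n' :: t) cur acc
            = PySem.Chars.splitOn.go ['\n'] fuel t [] (cur.reverse :: acc) from by
          simp [PySem.Chars.splitOn.go, pv_prefix_cons_true]]
        rw [ih t [] (cur.reverse :: acc) (by simp at h; omega)]
        simp [pvLines, hL]
      · rw [show PySem.Chars.splitOn.go ['\n'] (fuel + 1) (c :: t) cur acc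
            = PySem.Chars.splitOn.go ['\n'] fuel t (c :: cur) acc from by
          simp [PySem.Chars.splitOn.go, pv_prefix_cons_false t hc]]
        rw [ih t (c :: cur) acc (by simp at h; omega)]
        simp [pvLines, hc, hL]

theorem pv_splitOn_nl (l : List Char) : PySem.Chars.splitOn l ['\n'] = pvLines l := by
  unfold PySem.Chars.splitOn
  rw [pv_splitgo (l.length + 1) l [] [] (by omega)]
  obtain ⟨h0, r, hL⟩ := List.exists_cons_of_ne_nil (pv_pvLines_ne_nil l)
  simp [hL]

theorem pv_takeWhile_all (u : List Char) (h : '\n' ∉ u) : u.takeWhile pvKeep = u := by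
  apply List.takeWhile_eq_self_iff.mpr
  intro x hx
  cases hq : pvKeep x
  · exfalso
    rw [(pv_keep_false_iff x).mp hq] at hx
    exact h hx
  · rfl

theorem pv_takeWhile_snoc_nl (u : List Char) : (u ++ ['\n']).takeWhile pvKeep = u.takeWhile pvKeep := by
  rw [List.takeWhile_append]
  split_ifs with h
  · have heq : u.takeWhile pvKeep = u := (List.takeWhile_prefix _).eq_of_length h
    rw [show List.takeWhile pvKeep ['\n'] = [] from by simp [pvKeep]]
    rw [heq]
    simp
  · rfl

theorem pv_takeWhile_snoc_keep (u : List Char) (c : Char) (hc : c ≠ '\n') (h : '\n' ∉ u) :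
    (u ++ [c]).takeWhile pvKeep = u ++ [c] := by
  rw [List.takeWhile_append, pv_takeWhile_all u h]
  simp [pvKeep, hc]

theorem pv_takeWhile_snoc_mem (u : List Char) (c : Char) (h : '\n' ∈ u) :
    (u ++ [c]).takeWhile pvKeep = u.takeWhile pvKeep := by
  rw [List.takeWhile_append]
  split_ifs with hlen
  · exfalso
    have heq : u.takeWhile pvKeep = u := (List.takeWhile_prefix _).eq_of_length hlen
    have h2 : '\n' ∈ u.takeWhile pvKeep := by rw [heq]; exact h
    exact pv_not_mem_takeWhile u h2
  · rfl

theorem pv_get_pvLines (l : List Char) : ∀ i : Nat, i ≤ l.length →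
    (pvLines l)[(l.take i).count '\n']? = some (pvCur l i) := by
  induction l with
  | nil =>
    intro i hi
    have : i = 0 := Nat.le_zero.mp hi
    subst this
    simp [pvLines, pvCur]
  | cons c t ih =>
    intro i hi
    cases i with
    | zero =>
      by_cases hc : c = '\n'
      · subst hc
        simp [pvLines, pvCur, pvKeep]
      · have h0 := ih 0 (Nat.zero_le _)
        simp only [List.take_zero, List.count_nil] at h0
        have hpv : pvLines (c :: t) = (pvLines t).modifyHead (c :: ·) := by simp [pvLines, hc]
        simp only [List.take_zero, List.count_nil, hpv, List.getElem?_modifyHead, if_pos rfl, h0,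
          Option.map_some]
        simp [pvCur, pvKeep, hc]
    | succ i' =>
      have hi' : i' ≤ t.length := by simpa using hi
      have key := ih i' hi'
      by_cases hc : c = '\n'
      · subst hc
        have hcnt : ((('\n' : Char) :: t).take (i' + 1)).count '\n' = (t.take i').count '\n' + 1 := by
          simp [List.take_succ_cons]
        have hpv : pvLines ('\n' :: t) = [] :: pvLines t := by simp [pvLines]
        rw [hcnt, hpv, List.getElem?_cons_succ, key]
        congr 1
        simp only [pvCur, List.take_succ_cons, List.drop_succ_cons]
        rw [show (('\n' : Char) :: t.take i').reverse = (t.take i').reverse ++ ['\n'] from by simp]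
        rw [pv_takeWhile_snoc_nl]
      · have hcnt : ((c :: t).take (i' + 1)).count '\n' = (t.take i').count '\n' := by
          rw [List.take_succ_cons, List.count_cons, if_neg (by simp [hc]), Nat.add_zero]
        have hpv : pvLines (c :: t) = (pvLines t).modifyHead (c :: ·) := by simp [pvLines, hc]
        rw [hcnt, hpv, List.getElem?_modifyHead]
        by_cases hk : (t.take i').count '\n' = 0
        · have hnm : '\n' ∉ t.take i' := List.count_eq_zero.mp hk
          have hnm' : '\n' ∉ (t.take i').reverse := by simpa using hnm
          rw [if_pos hk, key, Option.map_some]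
          congr 1
          simp only [pvCur, List.take_succ_cons, List.drop_succ_cons]
          rw [show ((c : Char) :: t.take i').reverse = (t.take i').reverse ++ [c] from by simp]
          rw [pv_takeWhile_snoc_keep _ c hc hnm', pv_takeWhile_all _ hnm']
          simp
        · rw [if_neg hk, key]
          congr 1
          simp only [pvCur, List.take_succ_cons, List.drop_succ_cons]
          have hm : '\n' ∈ (t.take i').reverse := by
            simpa using List.count_pos_iff.mp (Nat.pos_of_ne_zero hk)
          rw [show ((c : Char) :: t.take i').reverse = (t.take i').reverse ++ [c] from by simp]
          rw [pv_takeWhile_snoc_mem _ c hm]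

theorem pv_drop_takeWhile_rev (l : List Char) :
    l.drop (l.length - (l.reverse.takeWhile pvKeep).length) = (l.reverse.takeWhile pvKeep).reverse := by
  have h0 := congrArg List.length (List.takeWhile_append_dropWhile (p := pvKeep) (l := l.reverse))
  simp only [List.length_append, List.length_reverse] at h0
  have hsplit : l = (l.reverse.dropWhile pvKeep).reverse ++ (l.reverse.takeWhile pvKeep).reverse := by
    rw [← List.reverse_append, List.takeWhile_append_dropWhile, List.reverse_reverse]
  calc l.drop (l.length - (l.reverse.takeWhile pvKeep).length)
      = ((l.reverse.dropWhile pvKeep).reverse ++ (l.reverse.takeWhile pvKeep).reverse).drop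
          (((l.reverse.dropWhile pvKeep).reverse).length) := by
        rw [← hsplit]
        congr 1
        simp only [List.length_reverse]
        omega
    _ = (l.reverse.takeWhile pvKeep).reverse := List.drop_left

theorem pv_take_takeWhile (l : List Char) :
    l.take ((l.takeWhile pvKeep).length) = l.takeWhile pvKeep := by
  calc l.take ((l.takeWhile pvKeep).length)
      = (l.takeWhile pvKeep ++ l.dropWhile pvKeep).take ((l.takeWhile pvKeep).length) := by
        rw [List.takeWhile_append_dropWhile]
    _ = l.takeWhile pvKeep := List.take_left

theorem pv_mem_iff_lt (l : List Char) : '\n' ∈ l ↔ (l.takeWhile pvKeep).length < l.length := by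
  constructor
  · intro h
    by_contra hlt
    have hle := (List.takeWhile_prefix (p := pvKeep) (l := l)).length_le
    have heq : l.takeWhile pvKeep = l :=
      (List.takeWhile_prefix _).eq_of_length (le_antisymm hle (not_lt.mp hlt))
    have h2 : '\n' ∈ l.takeWhile pvKeep := by rw [heq]; exact h
    exact pv_not_mem_takeWhile l h2
  · intro h
    by_contra hm
    rw [pv_takeWhile_all l hm] at h
    exact lt_irrefl _ h

theorem pv_mem_iff_lt_rev (l : List Char) : '\n' ∈ l ↔ (l.reverse.takeWhile pvKeep).length < l.length := by
  rw [show ('\n' ∈ l ↔ '\n' ∈ l.reverse) from (List.mem_reverse).symm, pv_mem_iff_lt l.reverse,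
    List.length_reverse]

-- uniform value of A's line_start computation
theorem pv_lsx (s : List Char) (P : Nat) (hP : P ≤ s.length) :
    (if PySem.Chars.rfind (s.take P) ['\n'] = -1 then (0 : Int)
     else PySem.Chars.rfind (s.take P) ['\n'] + 1)
      = (((P - ((s.take P).reverse.takeWhile pvKeep).length : Nat)) : Int) := by
  have hlen : (s.take P).length = P := by simp; omega
  rw [pv_rfind_nl, hlen]
  by_cases hm : '\n' ∈ s.take P
  · have hw : ((s.take P).reverse.takeWhile pvKeep).length < P := by
      have := (pv_mem_iff_lt_rev (s.take P)).mp hm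
      omega
    rw [if_pos hm,
      if_neg (show ¬ (((P - 1 - ((s.take P).reverse.takeWhile pvKeep).length : Nat) : Int) = -1) by omega)]
    omega
  · rw [if_neg hm, if_pos rfl, pv_takeWhile_all _ (by simpa using hm)]
    simp [hlen]

-- uniform value of A's line_end computation
theorem pv_lex (s : List Char) (P : Nat) (hP : P ≤ s.length) :
    (if PySem.Chars.findFrom s ['\n'] ((P : Nat) : Int) = -1 then (s.length : Int)
     else PySem.Chars.findFrom s ['\n'] ((P : Nat) : Int))
      = (((P + ((s.drop P).takeWhile pvKeep).length : Nat)) : Int) := by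
  rw [PySem.Chars.findFrom_natCast s ['\n'] P hP, pv_find_nl]
  by_cases hm : '\n' ∈ s.drop P
  · have hw : ((s.drop P).takeWhile pvKeep).length < s.length - P := by
      have h1 := (pv_mem_iff_lt (s.drop P)).mp hm
      have h2 : (s.drop P).length = s.length - P := by simp
      omega
    rw [if_pos hm,
      if_neg (show ¬ (((((s.drop P).takeWhile pvKeep).length : Nat) : Int) = -1) by omega),
      if_neg (show ¬ ((P : Int) + ((((s.drop P).takeWhile pvKeep).length : Nat) : Int) = -1) by omega)]
    push_cast
    ring
  · rw [if_neg hm, if_pos rfl, pv_takeWhile_all _ hm]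
    simp
    omega

theorem pv_cur_slice (s : List Char) (P w1 w2 : Nat) (hP : P ≤ s.length)
    (hw1 : w1 = ((s.take P).reverse.takeWhile pvKeep).length)
    (hw2 : w2 = ((s.drop P).takeWhile pvKeep).length) :
    List.take ((P + w2) - (P - w1)) (List.drop (P - w1) s) = pvCur s P := by
  have hlen : (s.take P).length = P := by simp; omega
  have hw1le : w1 ≤ P := by
    subst hw1
    have := (List.takeWhile_prefix (p := pvKeep) (l := (s.take P).reverse)).length_le
    simpa [hlen] using this
  have hX : List.drop (P - w1) (s.take P) = ((s.take P).reverse.takeWhile pvKeep).reverse := by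
    have h := pv_drop_takeWhile_rev (s.take P)
    rw [hlen] at h
    rw [hw1]
    exact h
  have hsplit : List.drop (P - w1) s = ((s.take P).reverse.takeWhile pvKeep).reverse ++ s.drop P := by
    conv_lhs => rw [show s = s.take P ++ s.drop P from (List.take_append_drop P s).symm]
    rw [List.drop_append, hlen, show (P - w1) - P = 0 from by omega, List.drop_zero, hX]
  rw [show (P + w2) - (P - w1) = w1 + w2 from by omega, hsplit, List.take_add]
  rw [show w1 = (((s.take P).reverse.takeWhile pvKeep).reverse).length from by simp [hw1]]
  rw [List.take_left, List.drop_left, hw2, pv_take_takeWhile]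
  rfl

theorem pv_prev_slice (s : List Char) (i w : Nat) (hi : i ≤ s.length)
    (hw : w = ((s.take i).reverse.takeWhile pvKeep).length)
    (hnl : (s.drop i).takeWhile pvKeep = []) :
    List.take (i - (i - w)) (List.drop (i - w) s) = pvCur s i := by
  have hlen : (s.take i).length = i := by simp; omega
  have hwle : w ≤ i := by
    subst hw
    have := (List.takeWhile_prefix (p := pvKeep) (l := (s.take i).reverse)).length_le
    simpa [hlen] using this
  have hX : List.drop (i - w) (s.take i) = ((s.take i).reverse.takeWhile pvKeep).reverse := by
    have h := pv_drop_takeWhile_rev (s.take i)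
    rw [hlen] at h
    rw [hw]
    exact h
  have hsplit : List.drop (i - w) s = ((s.take i).reverse.takeWhile pvKeep).reverse ++ s.drop i := by
    conv_lhs => rw [show s = s.take i ++ s.drop i from (List.take_append_drop i s).symm]
    rw [List.drop_append, hlen, show (i - w) - i = 0 from by omega, List.drop_zero, hX]
  rw [show i - (i - w) = w from by omega, hsplit]
  rw [show w = (((s.take i).reverse.takeWhile pvKeep).reverse).length from by simp [hw]]
  rw [List.take_left]
  simp [pvCur, hnl]

theorem pv_next_slice (s : List Char) (i w : Nat)
    (hw : w = ((s.drop i).takeWhile pvKeep).length)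
    (hnl : (s.take i).reverse.takeWhile pvKeep = []) :
    List.take ((i + w) - i) (List.drop i s) = pvCur s i := by
  rw [show (i + w) - i = w from by omega, hw, pv_take_takeWhile]
  simp [pvCur, hnl]

theorem pv_drop_takeWhile_len (d : List Char) :
    d.drop ((d.takeWhile pvKeep).length) = d.dropWhile pvKeep := by
  calc d.drop ((d.takeWhile pvKeep).length)
      = (d.takeWhile pvKeep ++ d.dropWhile pvKeep).drop ((d.takeWhile pvKeep).length) := by
        rw [List.takeWhile_append_dropWhile]
    _ = d.dropWhile pvKeep := List.drop_left

theorem pv_dropWhile_head (d : List Char) (hm : '\n' ∈ d) :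
    d.dropWhile pvKeep = '\n' :: (d.dropWhile pvKeep).tail := by
  have hne : d.dropWhile pvKeep ≠ [] := by
    intro h0
    have := List.dropWhile_eq_nil_iff.mp h0 '\n' hm
    simp [pvKeep] at this
  obtain ⟨a, r, hdw⟩ := List.exists_cons_of_ne_nil hne
  have ha : a = '\n' := by
    have := List.head_dropWhile_not pvKeep hne
    simp only [hdw, List.head_cons] at this
    exact (pv_keep_false_iff a).mp this
  rw [hdw, ha]
  rfl

theorem pv_take_to_nl (a d : List Char) (hm : '\n' ∈ d) :
    (a ++ d).take (a.length + ((d.takeWhile pvKeep).length + 1))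
      = a ++ (d.takeWhile pvKeep ++ ['\n']) := by
  rw [List.take_add, List.take_left, List.drop_left]
  congr 1
  rw [List.take_add, pv_take_takeWhile, pv_drop_takeWhile_len]
  congr 1
  rw [pv_dropWhile_head d hm]
  rfl

theorem pv_drop_of_eq_append (s u rest : List Char) (h : s = u ++ rest) : s.drop u.length = rest := by
  rw [h, List.drop_left]

theorem pv_take_of_eq_append (s u rest : List Char) (h : s = u ++ rest) : s.take u.length = u := by
  rw [h, List.take_left]

theorem pv_A_canon (pt tr : String) (ws : List String) (P : Nat)
    (hgt : (tr == "") = false) (hgp : (pt == "") = false)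
    (hfind : PySem.Chars.find pt.toList tr.toList = (P : Int)) (hP : P ≤ pt.toList.length) :
    find_wells_in_caption pt tr ws = pvCanon pt P ws := by
  have hfind' : PySem.Str.find pt tr = ((P : Nat) : Int) := by
    simp [PySem.Str.find, hfind]
  have hnl : ("\n" : String).toList = ['\n'] := rfl
  have hlenTP : (pt.toList.take P).length = P := by rw [List.length_take]; omega
  have hrf : PySem.Str.rfindFrom pt "\n" 0 (some ((P : Nat) : Int))
      = PySem.Chars.rfind (pt.toList.take P) ['\n'] := by
    simp only [PySem.Str.rfindFrom, hnl]
    exact pv_rfindFrom_zero_some _ _ P hP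
  have hff : PySem.Str.findFrom pt "\n" ((P : Nat) : Int) none
      = PySem.Chars.findFrom pt.toList ['\n'] ((P : Nat) : Int) := by
    simp only [PySem.Str.findFrom, hnl]
  unfold find_wells_in_caption pvCanon
  simp only [hfind', if_neg (show ¬ ((tr == "" || pt == "") = true) from by simp [hgt, hgp]),
    if_neg (show ¬ (((P : Nat) : Int) = -1) from by omega),
    hrf, hff, PySem.Str.len_eq, pv_lsx pt.toList P hP, pv_lex pt.toList P hP,
    Int.natCast_pos, Nat.cast_lt]

  have hcurS : PySem.Str.slice pt
      (some ((P - (List.takeWhile pvKeep (List.take P pt.toList).reverse).length : Nat) : Int))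
      (some ((P + (List.takeWhile pvKeep (List.drop P pt.toList)).length : Nat) : Int))
      = String.ofList (pvCur pt.toList P) := by
    rw [← String.toList_inj]
    simp only [PySem.Str.toList_slice, PySem.Chars.slice_eq_listSlice, PySem.List.slice_natCast,
      String.toList_ofList]
    exact pv_cur_slice pt.toList P _ _ hP rfl rfl
  simp only [hcurS]
  by_cases hg1 : 0 < P - (List.takeWhile pvKeep (List.take P pt.toList).reverse).length
  · have hm1 : '\n' ∈ List.take P pt.toList := by
      rw [pv_mem_iff_lt_rev, hlenTP]
      omega
    obtain ⟨u, hl, hulen⟩ := pv_decB (List.take P pt.toList) hm1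
    rw [hlenTP] at hulen
    have h0 : pt.toList = List.take P pt.toList ++ List.drop P pt.toList :=
      (List.take_append_drop P pt.toList).symm
    rw [hl] at h0
    have hfull : pt.toList
        = u ++ ('\n' :: (((List.take P pt.toList).reverse.takeWhile pvKeep).reverse ++ List.drop P pt.toList)) := by
      simpa [List.append_assoc] using h0
    have hdropprev : List.drop (P - (List.takeWhile pvKeep (List.take P pt.toList).reverse).length - 1) pt.toList
        = '\n' :: (((List.take P pt.toList).reverse.takeWhile pvKeep).reverse ++ List.drop P pt.toList) := by
      rw [← hulen]
      exact pv_drop_of_eq_append _ _ _ hfull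
    have hnlprev : (List.drop (P - (List.takeWhile pvKeep (List.take P pt.toList).reverse).length - 1) pt.toList).takeWhile pvKeep = [] := by
      rw [hdropprev]
      simp [pvKeep]
    have hcast1 : ((P - (List.takeWhile pvKeep (List.take P pt.toList).reverse).length : Nat) : Int) - 1 = ((P - (List.takeWhile pvKeep (List.take P pt.toList).reverse).length - 1 : Nat) : Int) := by omega
    have hrf2 : PySem.Str.rfindFrom pt "\n" 0 (some ((P - (List.takeWhile pvKeep (List.take P pt.toList).reverse).length - 1 : Nat) : Int))
        = PySem.Chars.rfind (pt.toList.take (P - (List.takeWhile pvKeep (List.take P pt.toList).reverse).length - 1)) ['\n'] := by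
      simp only [PySem.Str.rfindFrom, hnl]
      exact pv_rfindFrom_zero_some _ _ _ (by omega)
    have hprevS : PySem.Str.slice pt
        (some ((P - (List.takeWhile pvKeep (List.take P pt.toList).reverse).length - 1 - (List.takeWhile pvKeep (List.take (P - (List.takeWhile pvKeep (List.take P pt.toList).reverse).length - 1) pt.toList).reverse).length : Nat) : Int))
        (some ((P - (List.takeWhile pvKeep (List.take P pt.toList).reverse).length - 1 : Nat) : Int))
        = String.ofList (pvCur pt.toList (P - (List.takeWhile pvKeep (List.take P pt.toList).reverse).length - 1)) := by
      rw [← String.toList_inj]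
      simp only [PySem.Str.toList_slice, PySem.Chars.slice_eq_listSlice, PySem.List.slice_natCast,
        String.toList_ofList]
      exact pv_prev_slice pt.toList (P - (List.takeWhile pvKeep (List.take P pt.toList).reverse).length - 1) _ (by omega) rfl hnlprev
    simp only [hcast1, hrf2, pv_lsx pt.toList (P - (List.takeWhile pvKeep (List.take P pt.toList).reverse).length - 1) (by omega), hprevS]

    by_cases hg2 : P + (List.takeWhile pvKeep (List.drop P pt.toList)).length < pt.toList.length
    · have hm2 : '\n' ∈ List.drop P pt.toList := by
        rw [pv_mem_iff_lt, List.length_drop]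
        omega
      have htake2 : List.take (P + (List.takeWhile pvKeep (List.drop P pt.toList)).length + 1) pt.toList
          = List.take P pt.toList ++ ((List.drop P pt.toList).takeWhile pvKeep ++ ['\n']) := by
        have h := pv_take_to_nl (List.take P pt.toList) (List.drop P pt.toList) hm2
        rw [List.take_append_drop, hlenTP] at h
        rw [show P + (List.takeWhile pvKeep (List.drop P pt.toList)).length + 1 = P + ((List.takeWhile pvKeep (List.drop P pt.toList)).length + 1) from by omega]
        exact h
      have hnlnext : ((List.take (P + (List.takeWhile pvKeep (List.drop P pt.toList)).length + 1) pt.toList).reverse).takeWhile pvKeep = [] := by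
        rw [htake2]
        simp [pvKeep]
      have hcast2 : ((P + (List.takeWhile pvKeep (List.drop P pt.toList)).length : Nat) : Int) + 1 = ((P + (List.takeWhile pvKeep (List.drop P pt.toList)).length + 1 : Nat) : Int) := by omega
      have hff2 : PySem.Str.findFrom pt "\n" ((P + (List.takeWhile pvKeep (List.drop P pt.toList)).length + 1 : Nat) : Int) none
          = PySem.Chars.findFrom pt.toList ['\n'] ((P + (List.takeWhile pvKeep (List.drop P pt.toList)).length + 1 : Nat) : Int) := by
        simp only [PySem.Str.findFrom, hnl]
      have hnextS : PySem.Str.slice pt (some ((P + (List.takeWhile pvKeep (List.drop P pt.toList)).length + 1 : Nat) : Int))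
          (some ((P + (List.takeWhile pvKeep (List.drop P pt.toList)).length + 1 + (List.takeWhile pvKeep (List.drop (P + (List.takeWhile pvKeep (List.drop P pt.toList)).length + 1) pt.toList)).length : Nat) : Int))
          = String.ofList (pvCur pt.toList (P + (List.takeWhile pvKeep (List.drop P pt.toList)).length + 1)) := by
        rw [← String.toList_inj]
        simp only [PySem.Str.toList_slice, PySem.Chars.slice_eq_listSlice, PySem.List.slice_natCast,
          String.toList_ofList]
        exact pv_next_slice pt.toList (P + (List.takeWhile pvKeep (List.drop P pt.toList)).length + 1) _ rfl hnlnext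
      simp only [hcast2, hff2, pv_lex pt.toList (P + (List.takeWhile pvKeep (List.drop P pt.toList)).length + 1) (by omega), hnextS]
    · simp only [if_neg hg2]
  · simp only [if_neg hg1]

    by_cases hg2 : P + (List.takeWhile pvKeep (List.drop P pt.toList)).length < pt.toList.length
    · have hm2 : '\n' ∈ List.drop P pt.toList := by
        rw [pv_mem_iff_lt, List.length_drop]
        omega
      have htake2 : List.take (P + (List.takeWhile pvKeep (List.drop P pt.toList)).length + 1) pt.toList
          = List.take P pt.toList ++ ((List.drop P pt.toList).takeWhile pvKeep ++ ['\n']) := by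
        have h := pv_take_to_nl (List.take P pt.toList) (List.drop P pt.toList) hm2
        rw [List.take_append_drop, hlenTP] at h
        rw [show P + (List.takeWhile pvKeep (List.drop P pt.toList)).length + 1 = P + ((List.takeWhile pvKeep (List.drop P pt.toList)).length + 1) from by omega]
        exact h
      have hnlnext : ((List.take (P + (List.takeWhile pvKeep (List.drop P pt.toList)).length + 1) pt.toList).reverse).takeWhile pvKeep = [] := by
        rw [htake2]
        simp [pvKeep]
      have hcast2 : ((P + (List.takeWhile pvKeep (List.drop P pt.toList)).length : Nat) : Int) + 1 = ((P + (List.takeWhile pvKeep (List.drop P pt.toList)).length + 1 : Nat) : Int) := by omega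
      have hff2 : PySem.Str.findFrom pt "\n" ((P + (List.takeWhile pvKeep (List.drop P pt.toList)).length + 1 : Nat) : Int) none
          = PySem.Chars.findFrom pt.toList ['\n'] ((P + (List.takeWhile pvKeep (List.drop P pt.toList)).length + 1 : Nat) : Int) := by
        simp only [PySem.Str.findFrom, hnl]
      have hnextS : PySem.Str.slice pt (some ((P + (List.takeWhile pvKeep (List.drop P pt.toList)).length + 1 : Nat) : Int))
          (some ((P + (List.takeWhile pvKeep (List.drop P pt.toList)).length + 1 + (List.takeWhile pvKeep (List.drop (P + (List.takeWhile pvKeep (List.drop P pt.toList)).length + 1) pt.toList)).length : Nat) : Int))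
          = String.ofList (pvCur pt.toList (P + (List.takeWhile pvKeep (List.drop P pt.toList)).length + 1)) := by
        rw [← String.toList_inj]
        simp only [PySem.Str.toList_slice, PySem.Chars.slice_eq_listSlice, PySem.List.slice_natCast,
          String.toList_ofList]
        exact pv_next_slice pt.toList (P + (List.takeWhile pvKeep (List.drop P pt.toList)).length + 1) _ rfl hnlnext
      simp only [hcast2, hff2, pv_lex pt.toList (P + (List.takeWhile pvKeep (List.drop P pt.toList)).length + 1) (by omega), hnextS]
    · simp only [if_neg hg2]

theorem pv_B_canon (pt tr : String) (ws : List String) (P : Nat)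
    (hgt : (tr == "") = false) (hgp : (pt == "") = false)
    (hfind : PySem.Chars.find pt.toList tr.toList = (P : Int)) (hP : P ≤ pt.toList.length) :
    find_wells_in_caption_alt pt tr ws = pvCanon pt P ws := by
  have hfind' : PySem.Str.find pt tr = ((P : Nat) : Int) := by
    simp [PySem.Str.find, hfind]
  have hnl : ("\n" : String).toList = ['\n'] := rfl
  have hlenTP : (pt.toList.take P).length = P := by rw [List.length_take]; omega
  have hlines : (PySem.Str.split? pt "\n").getD [] = (pvLines pt.toList).map String.ofList := by
    simp [PySem.Str.split?, PySem.Chars.split?, hnl, pv_splitOn_nl]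
  have hslice0 : PySem.Str.slice pt (some 0) (some ((P : Nat) : Int))
      = String.ofList (pt.toList.take P) := by
    rw [← String.toList_inj]
    simp only [PySem.Str.toList_slice, PySem.Chars.slice_eq_listSlice, PySem.List.slice_zero_start,
      PySem.List.slice_to_natCast, String.toList_ofList]
  have hj : PySem.Str.count (String.ofList (pt.toList.take P)) "\n" = (pt.toList.take P).count '\n' := by
    simp only [PySem.Str.count, String.toList_ofList, hnl, pv_count_nl]
  unfold find_wells_in_caption_alt pvCanon
  simp only [hfind', if_neg (show ¬ ((tr == "" || pt == "") = true) from by simp [hgt, hgp]),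
    if_neg (show ¬ (((P : Nat) : Int) = -1) from by omega),
    hlines, hslice0, hj, List.length_map, pv_length_pvLines]

  have hcur : (List.map String.ofList (pvLines pt.toList)).getD (List.count '\n' (List.take P pt.toList)) ""
      = String.ofList (pvCur pt.toList P) := by
    rw [List.getD_eq_getElem?_getD, List.getElem?_map, pv_get_pvLines pt.toList P hP]
    rfl
  have hsum : List.count '\n' pt.toList
      = List.count '\n' (List.take P pt.toList) + List.count '\n' (List.drop P pt.toList) := by
    conv_lhs => rw [← List.take_append_drop P pt.toList]
    rw [List.count_append]
  by_cases hg2 : P + (List.takeWhile pvKeep (List.drop P pt.toList)).length < pt.toList.length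
  · have hm2 : '\n' ∈ List.drop P pt.toList := by
      rw [pv_mem_iff_lt, List.length_drop]
      omega
    have hcount2 : 0 < List.count '\n' (List.drop P pt.toList) := List.count_pos_iff.mpr hm2
    have hcond2 : List.count '\n' (List.take P pt.toList) + 1 < List.count '\n' pt.toList + 1 := by omega
    have htake2 : List.take (P + (List.takeWhile pvKeep (List.drop P pt.toList)).length + 1) pt.toList
        = List.take P pt.toList ++ ((List.drop P pt.toList).takeWhile pvKeep ++ ['\n']) := by
      have h := pv_take_to_nl (List.take P pt.toList) (List.drop P pt.toList) hm2
      rw [List.take_append_drop, hlenTP] at h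
      rw [show P + (List.takeWhile pvKeep (List.drop P pt.toList)).length + 1 = P + ((List.takeWhile pvKeep (List.drop P pt.toList)).length + 1) from by omega]
      exact h
    have hz2 : List.count '\n' ((List.drop P pt.toList).takeWhile pvKeep) = 0 :=
      List.count_eq_zero.mpr (pv_not_mem_takeWhile _)
    have hcnt2 : List.count '\n' (List.take (P + (List.takeWhile pvKeep (List.drop P pt.toList)).length + 1) pt.toList)
        = List.count '\n' (List.take P pt.toList) + 1 := by
      rw [htake2]
      simp [List.count_append, hz2]
    have hnext : (List.map String.ofList (pvLines pt.toList)).getD (List.count '\n' (List.take P pt.toList) + 1) ""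
        = String.ofList (pvCur pt.toList (P + (List.takeWhile pvKeep (List.drop P pt.toList)).length + 1)) := by
      rw [List.getD_eq_getElem?_getD, List.getElem?_map, ← hcnt2,
        pv_get_pvLines pt.toList (P + (List.takeWhile pvKeep (List.drop P pt.toList)).length + 1) (by omega)]
      rfl
    simp only [if_pos hcond2, if_pos hg2, hcur, hnext]

    by_cases hg1 : 0 < P - (List.takeWhile pvKeep (List.take P pt.toList).reverse).length
    · have hm1 : '\n' ∈ List.take P pt.toList := by
        rw [pv_mem_iff_lt_rev, hlenTP]
        omega
      obtain ⟨u, hl, hulen⟩ := pv_decB (List.take P pt.toList) hm1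
      rw [hlenTP] at hulen
      have h0 : pt.toList = List.take P pt.toList ++ List.drop P pt.toList :=
        (List.take_append_drop P pt.toList).symm
      rw [hl] at h0
      have hfull : pt.toList
          = u ++ (('\n' :: (((List.take P pt.toList).reverse.takeWhile pvKeep).reverse)) ++ List.drop P pt.toList) := by
        simpa [List.append_assoc] using h0
      have htk : List.take (P - (List.takeWhile pvKeep (List.take P pt.toList).reverse).length - 1) pt.toList = u := by
        rw [← hulen]
        exact pv_take_of_eq_append _ _ _ hfull
      have hz1 : List.count '\n' (((List.take P pt.toList).reverse.takeWhile pvKeep).reverse) = 0 :=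
        List.count_eq_zero.mpr (by simpa using pv_not_mem_takeWhile (List.take P pt.toList).reverse)
      have hcnt1 : List.count '\n' (List.take P pt.toList) = List.count '\n' u + 1 := by
        conv_lhs => rw [hl]
        simp [List.count_append, hz1]
      have hj1 : 0 < List.count '\n' (List.take P pt.toList) := by omega
      have hprevB : (List.map String.ofList (pvLines pt.toList)).getD (List.count '\n' (List.take P pt.toList) - 1) ""
          = String.ofList (pvCur pt.toList (P - (List.takeWhile pvKeep (List.take P pt.toList).reverse).length - 1)) := by
        rw [List.getD_eq_getElem?_getD, List.getElem?_map,
          show List.count '\n' (List.take P pt.toList) - 1 = List.count '\n' (List.take (P - (List.takeWhile pvKeep (List.take P pt.toList).reverse).length - 1) pt.toList) from by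
            rw [htk]; omega,
          pv_get_pvLines pt.toList (P - (List.takeWhile pvKeep (List.take P pt.toList).reverse).length - 1) (by omega)]
        rfl
      simp only [if_pos hg1, if_pos hj1, hprevB]
      by_cases hb1 : PySem.Str.strip (String.ofList (pvCur pt.toList (P - (List.takeWhile pvKeep (List.take P pt.toList).reverse).length - 1))) = "" <;>
      by_cases hb2 : String.ofList (pvCur pt.toList P) = "" <;>
      by_cases hb3 : PySem.Str.strip (String.ofList (pvCur pt.toList (P + (List.takeWhile pvKeep (List.drop P pt.toList)).length + 1))) = "" <;>
        simp [hb1, hb2, hb3]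
    · have hj1 : ¬ 0 < List.count '\n' (List.take P pt.toList) := by
        intro hpos
        have hm1 : '\n' ∈ List.take P pt.toList := List.count_pos_iff.mp hpos
        have h2 := (pv_mem_iff_lt_rev (List.take P pt.toList)).mp hm1
        rw [hlenTP] at h2
        omega
      simp only [if_neg hg1, if_neg hj1]
      by_cases hb2 : String.ofList (pvCur pt.toList P) = "" <;>
      by_cases hb3 : PySem.Str.strip (String.ofList (pvCur pt.toList (P + (List.takeWhile pvKeep (List.drop P pt.toList)).length + 1))) = "" <;>
        simp [hb2, hb3]
  · have hcond2 : ¬ (List.count '\n' (List.take P pt.toList) + 1 < List.count '\n' pt.toList + 1) := by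
      intro hpos
      have h1 : 0 < List.count '\n' (List.drop P pt.toList) := by omega
      have hm2 : '\n' ∈ List.drop P pt.toList := List.count_pos_iff.mp h1
      have h2 := (pv_mem_iff_lt (List.drop P pt.toList)).mp hm2
      rw [List.length_drop] at h2
      omega
    simp only [if_neg hcond2, if_neg hg2, hcur]

    by_cases hg1 : 0 < P - (List.takeWhile pvKeep (List.take P pt.toList).reverse).length
    · have hm1 : '\n' ∈ List.take P pt.toList := by
        rw [pv_mem_iff_lt_rev, hlenTP]
        omega
      obtain ⟨u, hl, hulen⟩ := pv_decB (List.take P pt.toList) hm1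
      rw [hlenTP] at hulen
      have h0 : pt.toList = List.take P pt.toList ++ List.drop P pt.toList :=
        (List.take_append_drop P pt.toList).symm
      rw [hl] at h0
      have hfull : pt.toList
          = u ++ (('\n' :: (((List.take P pt.toList).reverse.takeWhile pvKeep).reverse)) ++ List.drop P pt.toList) := by
        simpa [List.append_assoc] using h0
      have htk : List.take (P - (List.takeWhile pvKeep (List.take P pt.toList).reverse).length - 1) pt.toList = u := by
        rw [← hulen]
        exact pv_take_of_eq_append _ _ _ hfull
      have hz1 : List.count '\n' (((List.take P pt.toList).reverse.takeWhile pvKeep).reverse) = 0 :=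
        List.count_eq_zero.mpr (by simpa using pv_not_mem_takeWhile (List.take P pt.toList).reverse)
      have hcnt1 : List.count '\n' (List.take P pt.toList) = List.count '\n' u + 1 := by
        conv_lhs => rw [hl]
        simp [List.count_append, hz1]
      have hj1 : 0 < List.count '\n' (List.take P pt.toList) := by omega
      have hprevB : (List.map String.ofList (pvLines pt.toList)).getD (List.count '\n' (List.take P pt.toList) - 1) ""
          = String.ofList (pvCur pt.toList (P - (List.takeWhile pvKeep (List.take P pt.toList).reverse).length - 1)) := by
        rw [List.getD_eq_getElem?_getD, List.getElem?_map,
          show List.count '\n' (List.take P pt.toList) - 1 = List.count '\n' (List.take (P - (List.takeWhile pvKeep (List.take P pt.toList).reverse).length - 1) pt.toList) from by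
            rw [htk]; omega,
          pv_get_pvLines pt.toList (P - (List.takeWhile pvKeep (List.take P pt.toList).reverse).length - 1) (by omega)]
        rfl
      simp only [if_pos hg1, if_pos hj1, hprevB]
      by_cases hb1 : PySem.Str.strip (String.ofList (pvCur pt.toList (P - (List.takeWhile pvKeep (List.take P pt.toList).reverse).length - 1))) = "" <;>
      by_cases hb2 : String.ofList (pvCur pt.toList P) = "" <;>
      by_cases hb3 : PySem.Str.strip (String.ofList (pvCur pt.toList (P + (List.takeWhile pvKeep (List.drop P pt.toList)).length + 1))) = "" <;>
        simp [hb1, hb2, hb3]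
    · have hj1 : ¬ 0 < List.count '\n' (List.take P pt.toList) := by
        intro hpos
        have hm1 : '\n' ∈ List.take P pt.toList := List.count_pos_iff.mp hpos
        have h2 := (pv_mem_iff_lt_rev (List.take P pt.toList)).mp hm1
        rw [hlenTP] at h2
        omega
      simp only [if_neg hg1, if_neg hj1]
      by_cases hb2 : String.ofList (pvCur pt.toList P) = "" <;>
      by_cases hb3 : PySem.Str.strip (String.ofList (pvCur pt.toList (P + (List.takeWhile pvKeep (List.drop P pt.toList)).length + 1))) = "" <;>
        simp [hb2, hb3]

theorem pv_main (pt tr : String) (ws : List String) :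
    find_wells_in_caption pt tr ws = find_wells_in_caption_alt pt tr ws := by
  by_cases hg : (tr == "" || pt == "") = true
  · unfold find_wells_in_caption find_wells_in_caption_alt
    simp only [hg, if_true]
  · have hgt : (tr == "") = false := by
      cases h : (tr == "") <;> simp_all
    have hgp : (pt == "") = false := by
      cases h : (pt == "") <;> simp_all
    by_cases hr : PySem.Chars.find pt.toList tr.toList = -1
    · unfold find_wells_in_caption find_wells_in_caption_alt
      simp [hgt, hgp, PySem.Str.find, hr]
    · have hge : 0 ≤ PySem.Chars.find pt.toList tr.toList := by
        have := PySem.Chars.neg_one_le_find pt.toList tr.toList; omega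
      obtain ⟨P, hPeq⟩ : ∃ P : Nat, PySem.Chars.find pt.toList tr.toList = (P : Int) :=
        ⟨_, (Int.toNat_of_nonneg hge).symm⟩
      have hP : P ≤ pt.toList.length := by
        have := PySem.Chars.find_le_length pt.toList tr.toList; omega
      rw [pv_A_canon pt tr ws P hgt hgp hPeq hP, pv_B_canon pt tr ws P hgt hgp hPeq hP]

-- ===== VERDICT (by name: the statement is the Claim_ definition above) =====
theorem find_wells_in_caption_spec : Claim_equal_find_wells_in_caption := by
  intro pt tr ws _
  show _ = _
  exact pv_main pt tr ws
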